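-- pv_equiv track=rewrite | github.com/pkseeg/solved-kattis | geneticsearch.py | type_2
-- ===== SOURCE A (Python) =====
-- def type_1(s,l):
--     n = len(s)
--     count = 0
--     for i in range(len(l)):
--         if l[i:i+n] == s:
--             count += 1
--     return count
--
-- def type_2(s,l):
--     count = 0
--     seen = set()
--     for i in range(len(s)):
--         new_s = ''.join([s[j] for j in range(len(s)) if j != i])
--         if new_s not in seen:
--             count += type_1(new_s,l)
--             seen.add(new_s)
--     return count
-- ===== SOURCE B (Python) =====
-- def type_2(s, l):
--     n = len(s)
--     dels = {s[:i] + s[i + 1:] for i in range(n)}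
--     count = 0
--     for p in range(len(l)):
--         if l[p:p + n - 1] in dels:
--             count += 1
--     return count
-- ===== Notes on version B (the rewrite author's own statement) =====
-- stated objective: faster
-- what changed: Instead of generating each one-char deletion of s and rescanning l for it (nested loops), B precomputes the set of all one-char deletions once and makes a single pass over l, counting windows that belong to the set.
import Mathlib
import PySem

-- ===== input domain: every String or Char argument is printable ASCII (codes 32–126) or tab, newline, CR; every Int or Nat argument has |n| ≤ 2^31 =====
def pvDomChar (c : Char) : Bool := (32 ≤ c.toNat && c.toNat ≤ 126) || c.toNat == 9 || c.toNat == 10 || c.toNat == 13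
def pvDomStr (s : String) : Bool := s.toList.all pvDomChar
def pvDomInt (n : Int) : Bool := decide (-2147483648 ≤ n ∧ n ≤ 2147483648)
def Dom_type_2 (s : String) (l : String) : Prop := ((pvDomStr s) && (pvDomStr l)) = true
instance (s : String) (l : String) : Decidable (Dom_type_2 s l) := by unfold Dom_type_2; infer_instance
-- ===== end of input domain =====

-- B replaces A's per-deletion rescans of l by one precomputed deletion set and a single counting pass over l (objective: faster).

-- ===== PORT A =====
-- type_1(s, l): count positions i in range(len(l)) with l[i:i+len(s)] == s
def type_1_port (s l : List Char) : Int :=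
  (PySem.List.pyRange 0 (l.length : Int) 1).foldl
    (fun count i =>
      if PySem.List.slice l (some i) (some (i + (s.length : Int))) = s then count + 1 else count) 0

-- type_2(s, l): for each i, new_s = ''.join([s[j] for j in range(len(s)) if j != i]);
-- if new_s not in seen: count += type_1(new_s, l); seen.add(new_s)
def type_2 (s : String) (l : String) : Int :=
  ((PySem.List.pyRange 0 (s.toList.length : Int) 1).foldl
    (fun (st : Int × PySem.Set (List Char)) i =>
      let new_s : List Char :=
        (PySem.List.pyRange 0 (s.toList.length : Int) 1).foldl
          (fun acc j => if j ≠ i then acc ++ [PySem.List.pyGetD s.toList j ' '] else acc) []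
      if !(PySem.Set.contains st.2 new_s) then
        (st.1 + type_1_port new_s l.toList, PySem.Set.add st.2 new_s)
      else st)
    (0, PySem.Set.empty)).1

-- ===== PORT B =====
-- n = len(s); dels = {s[:i] + s[i+1:] for i in range(n)};
-- for p in range(len(l)): if l[p:p+n-1] in dels: count += 1
def type_2_alt (s : String) (l : String) : Int :=
  let n : Int := (s.toList.length : Int)
  let dels : PySem.Set (List Char) :=
    PySem.Set.ofList ((PySem.List.pyRange 0 n 1).map
      (fun i => PySem.List.slice s.toList none (some i)
        ++ PySem.List.slice s.toList (some (i + 1)) none))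
  (PySem.List.pyRange 0 (l.toList.length : Int) 1).foldl
    (fun count p =>
      if PySem.Set.contains dels
          (PySem.List.slice l.toList (some p) (some (p + n - 1))) then count + 1
      else count) 0

-- ===== PRECONDITION & SPEC =====
def Spec_type_2 (s : String) (l : String) (out : Int) : Prop := out = type_2_alt s l
instance (s : String) (l : String) (out : Int) : Decidable (Spec_type_2 s l out) := by
  unfold Spec_type_2; infer_instance

-- ===== CLAIM (what is proved, stated in full; the proofs are below) =====
def Claim_equal_type_2 : Prop := ∀ (s : String) (l : String), Dom_type_2 s l → Spec_type_2 s l (type_2 s l)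

-- ===== LEMMAS AND PROOFS =====

-- s with its k-th character deleted
def delAt (s : List Char) (k : Nat) : List Char := s.take k ++ s.drop (k + 1)

def delsList (sl : List Char) : List (List Char) := (List.range sl.length).map (delAt sl)

lemma len_delAt (sl : List Char) (k : Nat) (hk : k < sl.length) :
    (delAt sl k).length = sl.length - 1 := by
  simp [delAt]; omega

lemma map_range_cast {α : Type} (n : Nat) (f : Int → α) :
    (PySem.List.pyRange 0 (n : Int) 1).map f
      = (List.range n).map (fun k : Nat => f (k : Int)) := by
  rw [PySem.List.pyRange_one, List.map_map]
  simp only [Int.sub_zero, Int.toNat_natCast]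
  apply List.map_congr_left
  intro k _
  show f (0 + (k : Int)) = f (k : Int)
  norm_num

lemma foldl_range_cast {α : Type} (n : Nat) (g : α → Int → α) (init : α) :
    (PySem.List.pyRange 0 (n : Int) 1).foldl g init
      = (List.range n).foldl (fun (a : α) (k : Nat) => g a (k : Int)) init := by
  rw [PySem.List.pyRange_one, List.foldl_map]
  simp only [Int.sub_zero, Int.toNat_natCast]
  have h : (fun (a : α) (k : Nat) => g a ((0 : Int) + (k : Int)))
      = fun (a : α) (k : Nat) => g a (k : Int) := by
    funext a k; norm_num
  rw [h]

lemma contains_iff (s : List (List Char)) (x : List Char) :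
    PySem.Set.contains s x = true ↔ x ∈ s := by
  simp [PySem.Set.contains]

lemma map_getD_range (sl : List Char) (k : Nat) (hk : k ≤ sl.length) :
    (List.range k).map (fun t => sl.getD t ' ') = sl.take k := by
  apply List.ext_getElem
  · simp [hk]
  · intro i h1 h2
    simp at h1
    simp [List.getD_eq_getElem?_getD, List.getElem?_eq_getElem (by omega : i < sl.length)]

-- A's join-comprehension at index k equals delAt sl k
lemma compA (sl : List Char) (k : Nat) (hk : k < sl.length) :
    (PySem.List.pyRange 0 (sl.length : Int) 1).foldl
      (fun acc j => if j ≠ (k : Int) then acc ++ [PySem.List.pyGetD sl j ' '] else acc) []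
    = delAt sl k := by
  rw [PySem.List.foldl_append_ite (fun j => j ≠ (k : Int)) (fun j => PySem.List.pyGetD sl j ' ')]
  rw [PySem.List.pyRange_one_append 0 (k : Int) (sl.length : Int) (by positivity)
    (by exact_mod_cast hk.le)]
  rw [PySem.List.pyRange_one_cons (show (k : Int) < (sl.length : Int) by exact_mod_cast hk)]
  rw [List.filter_append]
  rw [List.filter_eq_self.mpr (fun j hj => by
    have h := PySem.List.mem_pyRange_one.mp hj
    simp; omega)]
  rw [List.filter_cons]
  simp only [ne_eq, not_true_eq_false, decide_false, Bool.false_eq_true, if_false]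
  rw [List.filter_eq_self.mpr (fun j hj => by
    have h := PySem.List.mem_pyRange_one.mp hj
    simp; omega)]
  rw [List.map_append]
  have h1 : (PySem.List.pyRange 0 (k : Int)).map (fun j => PySem.List.pyGetD sl j ' ')
      = sl.take k := by
    rw [PySem.List.pyRange_one, List.map_map]
    simp only [Int.sub_zero, Int.toNat_natCast]
    have : ((fun j => PySem.List.pyGetD sl j ' ') ∘ fun t : Nat => (0 : Int) + (t : Int))
        = fun t : Nat => sl.getD t ' ' := by
      funext t
      simp [PySem.List.pyGetD_natCast]
    rw [this, map_getD_range sl k hk.le]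
  have h2 : (PySem.List.pyRange ((k : Int) + 1) (sl.length : Int)).map
      (fun j => PySem.List.pyGetD sl j ' ') = sl.drop (k + 1) := by
    rw [PySem.List.map_pyGetD_pyRange' sl ' ' (by positivity : (0 : Int) ≤ (k : Int) + 1)]
    norm_num
  rw [h1, h2]
  simp [delAt]

-- B's set-comprehension element at index k equals delAt sl k
lemma delB (sl : List Char) (k : Nat) :
    PySem.List.slice sl none (some (k : Int)) ++ PySem.List.slice sl (some ((k : Int) + 1)) none
      = delAt sl k := by
  have h : ((k : Int) + 1) = (((k + 1 : Nat)) : Int) := by push_cast; ring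
  rw [h, PySem.List.slice_to_natCast, PySem.List.slice_from_natCast]
  rfl

-- the elements A's seen-set loop actually counts: first occurrences not already in seen
def newOf (seen : List (List Char)) : List (List Char) → List (List Char)
  | [] => []
  | x :: r => if PySem.Set.contains seen x then newOf seen r else x :: newOf (seen ++ [x]) r

lemma foldA (occ : List Char → Int) (xs : List (List Char)) :
    ∀ (c : Int) (seen : PySem.Set (List Char)),
    (xs.foldl (fun st x =>
        if !(PySem.Set.contains st.2 x) then (st.1 + occ x, PySem.Set.add st.2 x) else st)
      (c, seen)).1
    = c + ((newOf seen xs).map occ).sum := by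
  induction xs with
  | nil => intro c seen; simp [newOf]
  | cons x r ih =>
    intro c seen
    simp only [List.foldl_cons]
    by_cases hx : x ∈ seen
    · have h : PySem.Set.contains seen x = true := (contains_iff seen x).mpr hx
      rw [if_neg (by simp [PySem.Set.contains, hx])]
      rw [ih c seen]
      simp only [newOf]
      rw [if_pos h]
    · have h : ¬ PySem.Set.contains seen x = true := fun hc => hx ((contains_iff seen x).mp hc)
      rw [if_pos (by simp [PySem.Set.contains, hx])]
      rw [show PySem.Set.add seen x = seen ++ [x] from by
        simp [PySem.Set.add, PySem.Set.contains, hx]]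
      rw [ih (c + occ x) (seen ++ [x])]
      simp only [newOf]
      rw [if_neg h]
      simp only [List.map_cons, List.sum_cons]
      ring

lemma mem_newOf (w : List Char) : ∀ (xs seen : List (List Char)),
    w ∈ newOf seen xs ↔ w ∈ xs ∧ w ∉ seen := by
  intro xs
  induction xs with
  | nil => intro seen; simp [newOf]
  | cons x r ih =>
    intro seen
    by_cases hx : x ∈ seen
    · have h : PySem.Set.contains seen x = true := (contains_iff seen x).mpr hx
      simp only [newOf]
      rw [if_pos h, ih, List.mem_cons]
      constructor
      · rintro ⟨hw, hs⟩; exact ⟨Or.inr hw, hs⟩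
      · rintro ⟨hw | hw, hs⟩
        · subst hw; exact absurd hx hs
        · exact ⟨hw, hs⟩
    · have h : ¬ PySem.Set.contains seen x = true := fun hc => hx ((contains_iff seen x).mp hc)
      simp only [newOf]
      rw [if_neg h, List.mem_cons, List.mem_cons, ih]
      constructor
      · rintro (hw | ⟨hw, hs⟩)
        · subst hw; exact ⟨Or.inl rfl, hx⟩
        · simp at hs; exact ⟨Or.inr hw, hs.1⟩
      · rintro ⟨hw | hw, hs⟩
        · exact Or.inl hw
        · by_cases hwx : w = x
          · exact Or.inl hwx
          · exact Or.inr ⟨hw, by simp [hs, hwx]⟩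

lemma nodup_newOf : ∀ (xs seen : List (List Char)), (newOf seen xs).Nodup := by
  intro xs
  induction xs with
  | nil => intro seen; simp [newOf]
  | cons x r ih =>
    intro seen
    by_cases h : PySem.Set.contains seen x = true
    · simp only [newOf]
      rw [if_pos h]
      exact ih seen
    · simp only [newOf]
      rw [if_neg h, List.nodup_cons]
      refine ⟨fun hmem => ?_, ih (seen ++ [x])⟩
      have := (mem_newOf x r (seen ++ [x])).mp hmem
      simp at this

lemma sum_ite_mem (x : List Char) : ∀ (N : List (List Char)), N.Nodup →
    (N.map (fun d => if x = d then (1 : Int) else 0)).sum = if x ∈ N then 1 else 0 := by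
  intro N
  induction N with
  | nil => simp
  | cons d N' ih =>
    intro hN
    have hd : d ∉ N' := (List.nodup_cons.mp hN).1
    have hN' : N'.Nodup := (List.nodup_cons.mp hN).2
    by_cases hx : x = d
    · subst hx
      have hz : (N'.map (fun d' => if x = d' then (1 : Int) else 0)).sum = 0 :=
        List.sum_eq_zero (by
          intro y hy
          rcases List.mem_map.mp hy with ⟨d', hd', rfl⟩
          have hne : x ≠ d' := fun hcontra => hd (hcontra ▸ hd')
          simp [hne])
      simp [hz]
    · simp [hx, ih hN']

lemma swap_sum (w : Int → List Char) (N : List (List Char)) (hN : N.Nodup) :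
    ∀ (P : List Int),
      (N.map (fun d => ((P.countP (fun p => decide (w p = d)) : Nat) : Int))).sum
        = ((P.countP (fun p => decide (w p ∈ N)) : Nat) : Int) := by
  intro P
  induction P with
  | nil => simp
  | cons p P' ih =>
    simp only [List.countP_cons]
    have hsplit : (N.map (fun d =>
        ((P'.countP (fun q => decide (w q = d))
          + if decide (w p = d) = true then 1 else 0 : Nat) : Int))).sum
        = (N.map (fun d => ((P'.countP (fun q => decide (w q = d)) : Nat) : Int))).sum
          + (N.map (fun d => if w p = d then (1 : Int) else 0)).sum := by
      rw [← PySem.List.sum_map_add_int]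
      apply congrArg List.sum
      apply List.map_congr_left
      intro d _
      by_cases h : w p = d <;> simp [h]
    rw [hsplit, ih, sum_ite_mem (w p) N hN]
    by_cases h : w p ∈ N <;> simp [h]

-- type_1 as a countP over positions
lemma occ_countP (d ll : List Char) :
    type_1_port d ll
      = ((PySem.List.pyRange 0 (ll.length : Int) 1).countP
          (fun p => decide (PySem.List.slice ll (some p) (some (p + (d.length : Int))) = d)) : Int) := by
  unfold type_1_port
  rw [PySem.List.foldl_ite_add_one
    (fun i => PySem.List.slice ll (some i) (some (i + (d.length : Int))) = d)]
  simp

-- A expressed as the seen-set fold over the deletion list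
lemma typeA_eq (s l : String) :
    type_2 s l
      = ((delsList s.toList).foldl
          (fun st x =>
            if !(PySem.Set.contains st.2 x) then
              (st.1 + type_1_port x l.toList, PySem.Set.add st.2 x)
            else st)
          ((0 : Int), PySem.Set.empty)).1 := by
  simp only [type_2]
  rw [foldl_range_cast]
  unfold delsList
  rw [List.foldl_map]
  congr 1
  apply PySem.List.foldl_congr_mem
  intro st k hk
  rw [compA s.toList k (List.mem_range.mp hk)]

-- B expressed as a countP over positions against the deletion list
lemma typeB_eq (s l : String) :
    type_2_alt s l
      = ((PySem.List.pyRange 0 (l.toList.length : Int) 1).countP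
          (fun p => decide (PySem.List.slice l.toList (some p)
            (some (p + (s.toList.length : Int) - 1)) ∈ delsList s.toList)) : Int) := by
  simp only [type_2_alt]
  rw [PySem.List.foldl_if_add_one]
  have hset : (PySem.List.pyRange 0 ((s.toList.length : Nat) : Int) 1).map
      (fun i => PySem.List.slice s.toList none (some i)
        ++ PySem.List.slice s.toList (some (i + 1)) none) = delsList s.toList := by
    rw [map_range_cast]
    unfold delsList
    exact List.map_congr_left (fun k _ => delB s.toList k)
  simp only [hset]
  rw [Int.zero_add]
  congr 1
  apply List.countP_congr
  intro p _
  simp [PySem.Set.contains, PySem.Set.mem_ofList]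

-- ===== VERDICT (by name: the statement is the Claim_ definition above) =====
theorem type_2_spec : Claim_equal_type_2 := by
  intro s l _
  unfold Spec_type_2
  rcases Nat.eq_zero_or_pos s.toList.length with h0 | hpos
  · rw [typeA_eq, typeB_eq]
    unfold delsList
    rw [h0]
    simp
  · rw [typeA_eq, typeB_eq]
    rw [foldA (fun x => type_1_port x l.toList) (delsList s.toList) 0 PySem.Set.empty]
    have hlen : ∀ d ∈ newOf PySem.Set.empty (delsList s.toList),
        d.length = s.toList.length - 1 := by
      intro d hd
      have hmem : d ∈ delsList s.toList :=
        ((mem_newOf d (delsList s.toList) PySem.Set.empty).mp hd).1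
      rcases List.mem_map.mp hmem with ⟨k, hk, rfl⟩
      exact len_delAt s.toList k (List.mem_range.mp hk)
    have hocc : (newOf PySem.Set.empty (delsList s.toList)).map (fun x => type_1_port x l.toList)
        = (newOf PySem.Set.empty (delsList s.toList)).map
            (fun d => ((PySem.List.pyRange 0 (l.toList.length : Int) 1).countP
              (fun p => decide (PySem.List.slice l.toList (some p)
                (some (p + ((s.toList.length - 1 : Nat) : Int))) = d)) : Int)) := by
      apply List.map_congr_left
      intro d hd
      rw [occ_countP, hlen d hd]
    rw [hocc]
    rw [swap_sum (fun p => PySem.List.slice l.toList (some p)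
        (some (p + ((s.toList.length - 1 : Nat) : Int))))
      (newOf PySem.Set.empty (delsList s.toList))
      (nodup_newOf (delsList s.toList) PySem.Set.empty)
      (PySem.List.pyRange 0 (l.toList.length : Int) 1)]
    rw [Int.zero_add]
    congr 1
    apply List.countP_congr
    intro p _
    have harg : p + ((s.toList.length - 1 : Nat) : Int) = p + (s.toList.length : Int) - 1 := by
      omega
    rw [harg]
    simp only [decide_eq_true_eq]
    rw [mem_newOf]
    simp [PySem.Set.empty]
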